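-- pv_equiv track=rewrite | github.com/25f3001314-dev/Vivah.com | backend/kundli_milan.py | calc_bhakoot
-- ===== SOURCE A (Python) =====
-- def calc_bhakoot(rashi1_num, rashi2_num):
--     diff1 = ((rashi2_num - rashi1_num) % 12) + 1
--     diff2 = ((rashi1_num - rashi2_num) % 12) + 1
--     for d in [diff1, diff2]:
--         if d in [2, 12, 3, 11, 4, 10]:
--             return 0
--     if diff1 in [5, 9] and diff2 in [5, 9]:
--         return 7
--     if diff1 == 1 or diff2 == 1:
--         return 7
--     if diff1 == 6 or diff2 == 6:
--         return 0
--     return 7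
-- ===== SOURCE B (Python) =====
-- # Single closed-form table lookup keyed by d = (rashi2_num - rashi1_num) % 12,
-- # replacing A's branching cascade over diff1/diff2.
-- SCORE = {0: 7, 1: 0, 2: 0, 3: 0, 4: 7, 5: 0, 6: 7, 7: 0, 8: 7, 9: 0, 10: 0, 11: 0}
--
-- def calc_bhakoot(rashi1_num, rashi2_num):
--     return SCORE[(rashi2_num - rashi1_num) % 12]
-- ===== Notes on version B (the rewrite author's own statement) =====
-- stated objective: simpler
-- what changed: Replaces the diff1/diff2 branching cascade with a single precomputed 12-entry score table indexed by (rashi2_num - rashi1_num) % 12, on which the result provably depends alone.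
import Mathlib
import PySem

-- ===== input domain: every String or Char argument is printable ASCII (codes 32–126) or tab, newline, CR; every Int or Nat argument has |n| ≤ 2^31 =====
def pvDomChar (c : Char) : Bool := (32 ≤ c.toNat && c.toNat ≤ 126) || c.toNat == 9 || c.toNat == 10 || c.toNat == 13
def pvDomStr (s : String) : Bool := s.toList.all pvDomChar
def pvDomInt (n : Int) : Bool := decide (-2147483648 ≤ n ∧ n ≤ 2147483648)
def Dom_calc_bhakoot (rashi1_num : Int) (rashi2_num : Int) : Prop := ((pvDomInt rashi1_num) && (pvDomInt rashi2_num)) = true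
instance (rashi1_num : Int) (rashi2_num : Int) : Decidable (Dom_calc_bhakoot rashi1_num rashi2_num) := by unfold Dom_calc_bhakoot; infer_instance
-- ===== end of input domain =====

-- B replaces A's diff1/diff2 branching cascade by one precomputed 12-entry score
-- table indexed by (rashi2_num - rashi1_num) % 12 (objective: simpler).

-- ===== PORT A =====
def calc_bhakoot (rashi1_num : Int) (rashi2_num : Int) : Int :=
  let diff1 := PySem.Int.mod (rashi2_num - rashi1_num) 12 + 1
  let diff2 := PySem.Int.mod (rashi1_num - rashi2_num) 12 + 1
  -- the Python 'for d in [diff1, diff2]' loop, unrolled over the two-element literal list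
  if diff1 = 2 ∨ diff1 = 12 ∨ diff1 = 3 ∨ diff1 = 11 ∨ diff1 = 4 ∨ diff1 = 10 then 0
  else if diff2 = 2 ∨ diff2 = 12 ∨ diff2 = 3 ∨ diff2 = 11 ∨ diff2 = 4 ∨ diff2 = 10 then 0
  else if (diff1 = 5 ∨ diff1 = 9) ∧ (diff2 = 5 ∨ diff2 = 9) then 7
  else if diff1 = 1 ∨ diff2 = 1 then 7
  else if diff1 = 6 ∨ diff2 = 6 then 0
  else 7

-- ===== PORT B =====
def bhakootScore : PySem.Dict Int Int :=
  PySem.Dict.ofList [(0, 7), (1, 0), (2, 0), (3, 0), (4, 7), (5, 0), (6, 7), (7, 0), (8, 7), (9, 0), (10, 0), (11, 0)]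

def calc_bhakoot_alt (rashi1_num : Int) (rashi2_num : Int) : Int :=
  -- SCORE[d]: the key is always present (d ∈ 0..11), so getD's default is never used
  PySem.Dict.getD bhakootScore (PySem.Int.mod (rashi2_num - rashi1_num) 12) 0

-- ===== PRECONDITION & SPEC =====
def Spec_calc_bhakoot (rashi1_num : Int) (rashi2_num : Int) (out : Int) : Prop := out = calc_bhakoot_alt rashi1_num rashi2_num
instance (rashi1_num : Int) (rashi2_num : Int) (out : Int) : Decidable (Spec_calc_bhakoot rashi1_num rashi2_num out) := by unfold Spec_calc_bhakoot; infer_instance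

-- ===== CLAIM (what is proved, stated in full; the proofs are below) =====
def Claim_equal_calc_bhakoot : Prop := ∀ (rashi1_num : Int) (rashi2_num : Int), Dom_calc_bhakoot rashi1_num rashi2_num → Spec_calc_bhakoot rashi1_num rashi2_num (calc_bhakoot rashi1_num rashi2_num)

-- ===== LEMMAS AND PROOFS =====
theorem pymod12 (x : Int) : PySem.Int.mod x 12 = x % 12 := by
  simp [PySem.Int.mod, Int.fmod_eq_emod]

theorem calc_eq (a b : Int) : calc_bhakoot a b = calc_bhakoot_alt a b := by
  unfold calc_bhakoot calc_bhakoot_alt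
  rw [pymod12, pymod12]
  have h2 : (a - b) % 12 = (12 - (b - a) % 12) % 12 := by omega
  rw [h2]
  have h0 : 0 ≤ (b - a) % 12 := Int.emod_nonneg _ (by norm_num)
  have h1 : (b - a) % 12 < 12 := Int.emod_lt_of_pos _ (by norm_num)
  interval_cases h : (b - a) % 12 <;> decide

-- ===== VERDICT (by name: the statement is the Claim_ definition above) =====
theorem calc_bhakoot_spec : Claim_equal_calc_bhakoot := by
  intro a b _
  unfold Spec_calc_bhakoot
  exact calc_eq a b
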